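-- pv_equiv track=rewrite | github.com/Yosshi999/ARCGolfVisualizer | outputs/task302/752_20250804223652.py | p
-- ===== SOURCE A (Python) =====
-- def p(g):
--  h,w=len(g),len(g[0])
--  o=[r[:] for r in g]
--  v=[[0]*w for _ in range(h)]
--  for r in range(h):
--   for c in range(w):
--    if g[r][c]==5 and not v[r][c]:
--     for s in range(3,min(h-r,w-c)+1):
--      if r+s-1<h and c+s-1<w:
--       valid=True
--       for i in range(s):
--        if g[r][c+i]!=5 or g[r+s-1][c+i]!=5 or g[r+i][c]!=5 or g[r+i][c+s-1]!=5:
--         valid=False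
--         break
--       if valid:
--        for i in range(1,s-1):
--         for j in range(1,s-1):
--          if g[r+i][c+j]!=0:
--           valid=False
--           break
--         if not valid:break
--       if valid:
--        for i in range(1,s-1):
--         for j in range(1,s-1):
--          o[r+i][c+j]=5+s-2
--        for i in range(s):
--         for j in range(s):
--          v[r+i][c+j]=1
--        break
--  return o
-- ===== SOURCE B (Python) =====
-- def _runs(row, v):
--     out = [0] * len(row)
--     run = 0
--     for c in range(len(row) - 1, -1, -1):
--         run = run + 1 if row[c] == v else 0
--         out[c] = run
--     return out
--
-- def p(g):
--     h, w = len(g), len(g[0])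
--     R5 = [_runs(row, 5) for row in g]
--     R0 = [_runs(row, 0) for row in g]
--     D5 = [[0] * w for _ in range(h)]
--     for r in range(h - 1, -1, -1):
--         for c in range(w):
--             D5[r][c] = ((D5[r + 1][c] if r + 1 < h else 0) + 1) if g[r][c] == 5 else 0
--     o = [row[:] for row in g]
--     vis = [[0] * w for _ in range(h)]
--     for r in range(h):
--         for c in range(w):
--             if g[r][c] == 5 and not vis[r][c]:
--                 for s in range(3, min(h - r, w - c) + 1):
--                     if (R5[r][c] >= s and R5[r + s - 1][c] >= s
--                             and D5[r][c] >= s and D5[r][c + s - 1] >= s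
--                             and all(R0[r + i][c + 1] >= s - 2 for i in range(1, s - 1))):
--                         f = 5 + s - 2
--                         for i in range(1, s - 1):
--                             for j in range(1, s - 1):
--                                 o[r + i][c + j] = f
--                         for i in range(s):
--                             for j in range(s):
--                                 vis[r + i][c + j] = 1
--                         break
--     return o
-- ===== Notes on version B (the rewrite author's own statement) =====
-- stated objective: alternative
-- what changed: B precomputes run-length tables (rightward runs of 5s and of 0s per row, downward runs of 5s per column) and validates each candidate square by table lookups (four border lookups plus one per interior row), replacing A's per-candidate border rescan and nested interior rescan; on random grids A's early exits make it comparably fast, so no speed is claimed.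
-- outside the precondition, e.g. on p([]): A raises IndexError, B raises IndexError; on p([[5, 5], [5]]): A raises IndexError, B raises IndexError
import Mathlib
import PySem

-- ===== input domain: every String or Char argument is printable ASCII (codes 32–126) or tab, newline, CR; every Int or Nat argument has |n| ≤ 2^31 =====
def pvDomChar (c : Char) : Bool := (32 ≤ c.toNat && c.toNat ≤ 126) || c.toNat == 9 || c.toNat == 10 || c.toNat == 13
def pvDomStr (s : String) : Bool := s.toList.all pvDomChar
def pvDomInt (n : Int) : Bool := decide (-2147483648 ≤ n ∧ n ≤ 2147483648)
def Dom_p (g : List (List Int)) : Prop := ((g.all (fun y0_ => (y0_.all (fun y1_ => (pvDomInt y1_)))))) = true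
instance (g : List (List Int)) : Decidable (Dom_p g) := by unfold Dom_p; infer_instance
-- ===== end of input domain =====

-- B validates each candidate square by lookups in precomputed run-length tables
-- (rightward runs of 5s and 0s per row, downward runs of 5s per column) instead of
-- A's per-square border and interior rescans (alternative algorithm, cost comparable).

-- ===== PORT A =====
-- shared low-level grid access (both Pythons index 2D lists the same way; in-range under Pre_)
def pvGet2 (g : List (List Int)) (r c : Nat) : Int := (g.getD r []).getD c 0
def pvSet2 (g : List (List Int)) (r c : Nat) (x : Int) : List (List Int) :=
  g.modify r (fun row => row.set c x)
-- interior fill 'for i in range(1,s-1): for j in range(1,s-1): o[r+i][c+j]=x' (same loops in A and B)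
def pvFillI (o : List (List Int)) (r c s : Nat) (x : Int) : List (List Int) :=
  (List.range' 1 (s-2)).foldl (fun o i =>
    (List.range' 1 (s-2)).foldl (fun o j => pvSet2 o (r+i) (c+j) x) o) o
-- visited fill 'for i in range(s): for j in range(s): v[r+i][c+j]=1' (same loops in A and B)
def pvFillV (v : List (List Int)) (r c s : Nat) : List (List Int) :=
  (List.range s).foldl (fun v i =>
    (List.range s).foldl (fun v j => pvSet2 v (r+i) (c+j) 1) v) v

-- A's border check: the flag loop 'for i in range(s): if …: valid=False; break'
def pFrame (g : List (List Int)) (r c s : Nat) : Bool :=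
  (List.range s).all (fun i =>
    (pvGet2 g r (c+i) == 5) && (pvGet2 g (r+s-1) (c+i) == 5) &&
    (pvGet2 g (r+i) c == 5) && (pvGet2 g (r+i) (c+s-1) == 5))
-- A's interior check loops
def pInterior (g : List (List Int)) (r c s : Nat) : Bool :=
  (List.range' 1 (s-2)).all (fun i =>
    (List.range' 1 (s-2)).all (fun j => pvGet2 g (r+i) (c+j) == 0))
def pValid (g : List (List Int)) (h w r c s : Nat) : Bool :=
  decide (r+s-1 < h) && decide (c+s-1 < w) && pFrame g r c s && pInterior g r c s

-- body of A's double loop over (r,c); find? = 'for s in range(3,…): … break'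
def pCell (g : List (List Int)) (h w : Nat) (st : List (List Int) × List (List Int))
    (r c : Nat) : List (List Int) × List (List Int) :=
  if pvGet2 g r c == 5 && pvGet2 st.2 r c == 0 then
    match (List.range' 3 (min (h-r) (w-c) - 2)).find? (fun s => pValid g h w r c s) with
    | some s => (pvFillI st.1 r c s (5 + (s : Int) - 2), pvFillV st.2 r c s)
    | none => st
  else st

def p (g : List (List Int)) : List (List Int) :=
  let h := g.length
  let w := (g.headD []).length
  ((List.range h).foldl (fun st r =>
      (List.range w).foldl (fun st c => pCell g h w st r c) st)
    (g, List.replicate h (List.replicate w 0))).1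

-- ===== PORT B =====
-- suffix scan of a row: run length of consecutive v's starting at each index
def pvRuns (v : Int) (row : List Int) : List Nat :=
  row.foldr (fun x acc => (if x == v then acc.headD 0 + 1 else 0) :: acc) []
-- downward runs of 5s, computed bottom row up
def pvDown (w : Nat) (g : List (List Int)) : List (List Nat) :=
  g.foldr (fun row acc =>
    ((List.range w).map (fun c =>
      if row.getD c 0 == 5 then (acc.headD []).getD c 0 + 1 else 0)) :: acc) []
def pvTget (t : List (List Nat)) (r c : Nat) : Nat := (t.getD r []).getD c 0

-- B's square test: four border run lookups plus one run lookup per interior row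
def pAltValid (R5 R0 D5 : List (List Nat)) (r c s : Nat) : Bool :=
  decide (s ≤ pvTget R5 r c) && decide (s ≤ pvTget R5 (r+s-1) c) &&
  decide (s ≤ pvTget D5 r c) && decide (s ≤ pvTget D5 r (c+s-1)) &&
  (List.range' 1 (s-2)).all (fun i => decide (s-2 ≤ pvTget R0 (r+i) (c+1)))

def pAltCell (R5 R0 D5 : List (List Nat)) (g : List (List Int)) (h w : Nat)
    (st : List (List Int) × List (List Int)) (r c : Nat) :
    List (List Int) × List (List Int) :=
  if pvGet2 g r c == 5 && pvGet2 st.2 r c == 0 then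
    match (List.range' 3 (min (h-r) (w-c) - 2)).find? (fun s => pAltValid R5 R0 D5 r c s) with
    | some s => (pvFillI st.1 r c s (5 + (s : Int) - 2), pvFillV st.2 r c s)
    | none => st
  else st

def p_alt (g : List (List Int)) : List (List Int) :=
  let h := g.length
  let w := (g.headD []).length
  let R5 := g.map (pvRuns 5)
  let R0 := g.map (pvRuns 0)
  let D5 := pvDown w g
  ((List.range h).foldl (fun st r =>
      (List.range w).foldl (fun st c => pAltCell R5 R0 D5 g h w st r c) st)
    (g, List.replicate h (List.replicate w 0))).1

-- ===== PRECONDITION & SPEC =====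
-- Pre_ excludes exactly the inputs where A raises IndexError: the empty grid (g[0])
-- and grids with a row shorter than the first row (g[r][c] for c < len(g[0])).
def Pre_p (g : List (List Int)) : Prop :=
  g ≠ [] ∧ ∀ row ∈ g, (g.headD []).length ≤ row.length
instance (g : List (List Int)) : Decidable (Pre_p g) := by unfold Pre_p; infer_instance
def pvWitness_p : List (List Int) := [[5, 5, 5], [5, 0, 5], [5, 5, 5]]
def Spec_p (g : List (List Int)) (out : List (List Int)) : Prop := out = p_alt g
instance (g : List (List Int)) (out : List (List Int)) : Decidable (Spec_p g out) := by unfold Spec_p; infer_instance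

-- ===== CLAIM (what is proved, stated in full; the proofs are below) =====
def Claim_equal_p : Prop := ∀ (g : List (List Int)), Dom_p g → Pre_p g → Spec_p g (p g)

-- ===== LEMMAS AND PROOFS =====

theorem headD_eq_getD {α : Type} (l : List α) (d : α) : l.headD d = l.getD 0 d := by
  cases l <;> simp

theorem runs_ge (v : Int) (row : List Int) (c s : Nat) (hs : 1 ≤ s) :
    (s ≤ (pvRuns v row).getD c 0) ↔
      (c + s ≤ row.length ∧ ∀ j < s, row.getD (c+j) 0 = v) := by
  induction row generalizing c s with
  | nil =>
    simp [pvRuns]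
    omega
  | cons x xs ih =>
    have hruns : pvRuns v (x :: xs) =
        (if x == v then (pvRuns v xs).headD 0 + 1 else 0) :: pvRuns v xs := rfl
    cases c with
    | zero =>
      rw [hruns]
      by_cases hxv : x == v
      · have hx : x = v := by simpa using hxv
        rw [if_pos hxv, List.getD_cons_zero, headD_eq_getD]
        cases s with
        | zero => omega
        | succ s' =>
          rcases Nat.eq_zero_or_pos s' with h0 | h1
          · subst h0
            constructor
            · intro _
              refine ⟨by simp, ?_⟩
              intro j hj
              interval_cases j
              simpa using hx
            · intro _; omega
          · rw [Nat.succ_le_succ_iff, ih 0 s' h1]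
            constructor
            · rintro ⟨hl, hall⟩
              refine ⟨by simp; omega, ?_⟩
              intro j hj
              cases j with
              | zero => simpa using hx
              | succ j' =>
                have := hall j' (by omega)
                simpa using this
            · rintro ⟨hl, hall⟩
              refine ⟨by simp at hl; omega, ?_⟩
              intro j hj
              have := hall (j+1) (by omega)
              simpa using this
      · rw [if_neg hxv, List.getD_cons_zero]
        constructor
        · omega
        · rintro ⟨hl, hall⟩
          have h0 := hall 0 hs
          simp at h0
          exact absurd (beq_iff_eq.mpr h0) hxv
    | succ c' =>
      rw [hruns, List.getD_cons_succ, ih c' s hs]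
      constructor
      · rintro ⟨hl, hall⟩
        refine ⟨by simp; omega, ?_⟩
        intro j hj
        have := hall j hj
        have he : c' + 1 + j = (c' + j) + 1 := by omega
        rw [he, List.getD_cons_succ]
        exact this
      · rintro ⟨hl, hall⟩
        refine ⟨by simp at hl; omega, ?_⟩
        intro j hj
        have := hall j hj
        have he : c' + 1 + j = (c' + j) + 1 := by omega
        rw [he, List.getD_cons_succ] at this
        exact this

theorem getD_map_range {α : Type} (w c : Nat) (f : Nat → α) (d : α) (hc : c < w) :
    ((List.range w).map f).getD c d = f c := by
  rw [List.getD_eq_getElem _ _ (by simpa using hc)]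
  simp

theorem down_ge (w : Nat) (g : List (List Int)) (r c s : Nat) (hc : c < w) (hs : 1 ≤ s) :
    (s ≤ pvTget (pvDown w g) r c) ↔
      (r + s ≤ g.length ∧ ∀ i < s, pvGet2 g (r+i) c = 5) := by
  induction g generalizing r s with
  | nil =>
    simp [pvDown, pvTget]
    omega
  | cons row rest ih =>
    have hdown : pvDown w (row :: rest) =
        ((List.range w).map (fun c =>
          if row.getD c 0 == 5 then ((pvDown w rest).headD []).getD c 0 + 1 else 0))
          :: pvDown w rest := rfl
    cases r with
    | zero =>
      have hget : pvTget (pvDown w (row :: rest)) 0 c =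
          (if row.getD c 0 == 5 then pvTget (pvDown w rest) 0 c + 1 else 0) := by
        rw [hdown]
        unfold pvTget
        rw [List.getD_cons_zero, getD_map_range _ _ _ _ hc, headD_eq_getD]
      rw [hget]
      by_cases hxv : row.getD c 0 == 5
      · have hx : row.getD c 0 = 5 := by simpa using hxv
        rw [if_pos hxv]
        cases s with
        | zero => omega
        | succ s' =>
          rcases Nat.eq_zero_or_pos s' with h0 | h1
          · subst h0
            constructor
            · intro _
              refine ⟨by simp, ?_⟩
              intro i hi
              interval_cases i
              simpa [pvGet2] using hx
            · intro _; omega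
          · rw [Nat.succ_le_succ_iff, ih 0 s' h1]
            constructor
            · rintro ⟨hl, hall⟩
              refine ⟨by simp; omega, ?_⟩
              intro i hi
              cases i with
              | zero => simpa [pvGet2] using hx
              | succ i' =>
                have := hall i' (by omega)
                simpa [pvGet2] using this
            · rintro ⟨hl, hall⟩
              refine ⟨by simp at hl; omega, ?_⟩
              intro i hi
              have := hall (i+1) (by omega)
              simpa [pvGet2] using this
      · rw [if_neg hxv]
        constructor
        · omega
        · rintro ⟨hl, hall⟩
          have h0 := hall 0 hs
          simp [pvGet2] at h0
          exact absurd (beq_iff_eq.mpr h0) hxv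
    | succ r' =>
      have hget : pvTget (pvDown w (row :: rest)) (r'+1) c = pvTget (pvDown w rest) r' c := by
        rw [hdown]; unfold pvTget; rw [List.getD_cons_succ]
      rw [hget, ih r' s hs]
      constructor
      · rintro ⟨hl, hall⟩
        refine ⟨by simp; omega, ?_⟩
        intro i hi
        have := hall i hi
        have he : r' + 1 + i = (r' + i) + 1 := by omega
        rw [he]
        simpa [pvGet2] using this
      · rintro ⟨hl, hall⟩
        refine ⟨by simp at hl; omega, ?_⟩
        intro i hi
        have := hall i hi
        have he : r' + 1 + i = (r' + i) + 1 := by omega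
        rw [he] at this
        simpa [pvGet2] using this

theorem valid_eq (g : List (List Int)) (r c s : Nat)
    (hpre : ∀ row ∈ g, (g.headD []).length ≤ row.length)
    (hr : r < g.length) (hc : c < (g.headD []).length) (hs3 : 3 ≤ s)
    (hsm : s ≤ min (g.length - r) ((g.headD []).length - c)) :
    pValid g g.length (g.headD []).length r c s =
      pAltValid (g.map (pvRuns 5)) (g.map (pvRuns 0)) (pvDown (g.headD []).length g) r c s := by
  obtain ⟨hs1, hs2⟩ := Nat.le_min.mp hsm
  have hrs : r + s ≤ g.length := by omega
  have hcs : c + s ≤ (g.headD []).length := by omega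
  -- the run-table entry of row r' of g.map (pvRuns v)
  have hmapget : ∀ (v : Int) (r' : Nat), r' < g.length →
      ∀ c', pvTget (g.map (pvRuns v)) r' c' = (pvRuns v (g.getD r' [])).getD c' 0 := by
    intro v r' hr' c'
    have hmr : (List.map (pvRuns v) g).getD r' [] = pvRuns v (g.getD r' []) := by
      rw [List.getD_eq_getElem _ _ (by simpa using hr'), List.getD_eq_getElem _ _ hr',
        List.getElem_map]
    unfold pvTget
    rw [hmr]
  have hrowlen : ∀ r', r' < g.length → (g.headD []).length ≤ (g.getD r' []).length := by
    intro r' hr'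
    refine hpre _ ?_
    rw [List.getD_eq_getElem _ _ hr']
    exact List.getElem_mem hr'
  have B1 : (s ≤ pvTget (g.map (pvRuns 5)) r c) ↔ (∀ j < s, pvGet2 g r (c+j) = 5) := by
    rw [hmapget 5 r hr c, runs_ge 5 _ c s (by omega)]
    exact ⟨fun h => h.2, fun h => ⟨le_trans hcs (hrowlen r hr), h⟩⟩
  have B2 : (s ≤ pvTget (g.map (pvRuns 5)) (r+s-1) c) ↔
      (∀ j < s, pvGet2 g (r+s-1) (c+j) = 5) := by
    rw [hmapget 5 (r+s-1) (by omega) c, runs_ge 5 _ c s (by omega)]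
    exact ⟨fun h => h.2, fun h => ⟨le_trans hcs (hrowlen (r+s-1) (by omega)), h⟩⟩
  have B3 : (s ≤ pvTget (pvDown (g.headD []).length g) r c) ↔
      (∀ i < s, pvGet2 g (r+i) c = 5) := by
    rw [down_ge _ _ r c s hc (by omega)]
    exact ⟨fun h => h.2, fun h => ⟨hrs, h⟩⟩
  have B4 : (s ≤ pvTget (pvDown (g.headD []).length g) r (c+s-1)) ↔
      (∀ i < s, pvGet2 g (r+i) (c+s-1) = 5) := by
    rw [down_ge _ _ r (c+s-1) s (by omega) (by omega)]
    exact ⟨fun h => h.2, fun h => ⟨hrs, h⟩⟩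
  have BI : ∀ i, 1 ≤ i → i < 1 + (s-2) →
      ((s-2 ≤ pvTget (g.map (pvRuns 0)) (r+i) (c+1)) ↔
        (∀ j, 1 ≤ j → j < 1 + (s-2) → pvGet2 g (r+i) (c+j) = 0)) := by
    intro i hi1 hi2
    rw [hmapget 0 (r+i) (by omega) (c+1), runs_ge 0 _ (c+1) (s-2) (by omega)]
    constructor
    · rintro ⟨hl, hall⟩ j hj1 hj2
      have := hall (j-1) (by omega)
      have he : c + 1 + (j-1) = c + j := by omega
      rwa [he] at this
    · intro h
      refine ⟨le_trans (by omega) (hrowlen (r+i) (by omega)), ?_⟩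
      intro j hj
      have := h (j+1) (by omega) (by omega)
      have he : c + (j+1) = c + 1 + j := by omega
      rwa [he] at this
  apply Bool.eq_iff_iff.mpr
  simp only [pValid, pFrame, pInterior, pAltValid, Bool.and_eq_true, List.all_eq_true,
    decide_eq_true_eq, List.mem_range, List.mem_range'_1, beq_iff_eq]
  constructor
  · intro hA
    obtain ⟨⟨⟨hg1, hg2⟩, hframe⟩, hint⟩ := hA
    exact ⟨⟨⟨⟨B1.mpr fun j hj => (hframe j hj).1.1.1,
      B2.mpr fun j hj => (hframe j hj).1.1.2⟩,
      B3.mpr fun i hi => (hframe i hi).1.2⟩,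
      B4.mpr fun i hi => (hframe i hi).2⟩,
      fun i hi => (BI i hi.1 hi.2).mpr (fun j hj1 hj2 => hint i hi j ⟨hj1, hj2⟩)⟩
  · intro hB
    obtain ⟨⟨⟨⟨hb1, hb2⟩, hb3⟩, hb4⟩, hbi⟩ := hB
    refine ⟨⟨⟨by omega, by omega⟩,
      fun i hi => ⟨⟨⟨B1.mp hb1 i hi, B2.mp hb2 i hi⟩, B3.mp hb3 i hi⟩, B4.mp hb4 i hi⟩⟩,
      fun i hi j hj => (BI i hi.1 hi.2).mp (hbi i hi) j hj.1 hj.2⟩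

theorem find?_congr_mem {α : Type} (l : List α) (p q : α → Bool)
    (h : ∀ x ∈ l, p x = q x) : l.find? p = l.find? q := by
  induction l with
  | nil => rfl
  | cons a t ih =>
    have ha := h a (List.mem_cons_self ..)
    cases hq : q a
    · simp only [List.find?_cons, ha, hq]
      exact ih (fun x hx => h x (List.mem_cons_of_mem _ hx))
    · simp [ha, hq]

theorem cell_eq (g : List (List Int)) (r c : Nat)
    (hpre : ∀ row ∈ g, (g.headD []).length ≤ row.length)
    (hr : r < g.length) (hc : c < (g.headD []).length)
    (st : List (List Int) × List (List Int)) :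
    pCell g g.length (g.headD []).length st r c =
      pAltCell (g.map (pvRuns 5)) (g.map (pvRuns 0)) (pvDown (g.headD []).length g)
        g g.length (g.headD []).length st r c := by
  have hfind :
      (List.range' 3 (min (g.length - r) ((g.headD []).length - c) - 2)).find?
        (fun s => pValid g g.length (g.headD []).length r c s) =
      (List.range' 3 (min (g.length - r) ((g.headD []).length - c) - 2)).find?
        (fun s => pAltValid (g.map (pvRuns 5)) (g.map (pvRuns 0))
          (pvDown (g.headD []).length g) r c s) := by
    refine find?_congr_mem _ _ _ (fun s hsmem => ?_)
    obtain ⟨hs3, hslt⟩ := List.mem_range'_1.mp hsmem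
    have hsm : s ≤ min (g.length - r) ((g.headD []).length - c) := by
      generalize hM : min (g.length - r) ((g.headD []).length - c) = M at hslt
      omega
    exact valid_eq g r c s hpre hr hc hs3 hsm
  unfold pCell pAltCell
  rw [hfind]

-- ===== VERDICT (by name: the statement is the Claim_ definition above) =====
theorem p_spec : Claim_equal_p := by
  intro g _ hpre
  unfold Spec_p p p_alt
  refine congrArg Prod.fst ?_
  refine PySem.List.foldl_congr_mem _ _ _ _ (fun st r hrm => ?_)
  refine PySem.List.foldl_congr_mem _ _ _ _ (fun st' c hcm => ?_)
  exact cell_eq g r c hpre.2 (List.mem_range.mp hrm) (List.mem_range.mp hcm) st'
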